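-- pv_equiv track=rewrite | github.com/whybraun/myhomework-netology | 5. Function/main.py | get_directory
-- ===== SOURCE A (Python) =====
-- directories = {
--     '1': ['2207 876234', '11-2'],
--     '2': ['10006'],
--     '3': []
-- }
--
-- def get_directory(value, number):
--     for value in directories:
--         dir = directories[value]
--         for item in dir:
--             if item == number:
--                 return value
--     else:
--         return 'Полка с таким документом не найдена!'
-- ===== SOURCE B (Python) =====
-- directories = {
--     '1': ['2207 876234', '11-2'],
--     '2': ['10006'],
--     '3': []
-- }
--
-- # Reverse index: document number -> shelf key, first occurrence wins.
-- doc_to_shelf = {}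
-- for _shelf, _docs in directories.items():
--     for _doc in _docs:
--         if _doc not in doc_to_shelf:
--             doc_to_shelf[_doc] = _shelf
--
-- def get_directory(value, number):
--     return doc_to_shelf.get(number, 'Полка с таким документом не найдена!')
-- ===== Notes on version B (the rewrite author's own statement) =====
-- stated objective: idiomatic
-- what changed: Replaces the nested scan over shelves with a reverse-lookup dict (document number -> shelf, first occurrence kept) built once at module load, so the function body is a single dict .get.
import Mathlib
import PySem

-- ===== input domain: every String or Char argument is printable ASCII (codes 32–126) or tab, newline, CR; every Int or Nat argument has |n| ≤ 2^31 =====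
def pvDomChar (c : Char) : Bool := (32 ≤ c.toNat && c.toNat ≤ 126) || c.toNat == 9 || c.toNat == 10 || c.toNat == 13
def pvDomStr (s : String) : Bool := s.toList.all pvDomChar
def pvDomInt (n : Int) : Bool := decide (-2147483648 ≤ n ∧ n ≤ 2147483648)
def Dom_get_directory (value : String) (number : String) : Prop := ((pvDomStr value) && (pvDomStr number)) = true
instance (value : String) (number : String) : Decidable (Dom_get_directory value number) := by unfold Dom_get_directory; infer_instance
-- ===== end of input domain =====

-- B replaces A's per-call nested scan over the shelves with a reverse-lookup dict
-- (document -> shelf, first occurrence kept) built once, so the call is one lookup (idiomatic).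

-- ===== PORT A =====
def pvDirectories : List (String × List String) :=
  [("1", ["2207 876234", "11-2"]), ("2", ["10006"]), ("3", [])]

-- inner 'for item in dir: if item == number: return value'
def pvInnerLoop (value : String) (items : List String) (number : String) : Option String :=
  match items with
  | [] => none
  | item :: rest => if item == number then some value else pvInnerLoop value rest number

-- outer 'for value in directories'
def pvOuterLoop (entries : List (String × List String)) (number : String) : String :=
  match entries with
  | [] => "Полка с таким документом не найдена!"
  | (value, dir) :: rest =>
    match pvInnerLoop value dir number with
    | some v => v
    | none => pvOuterLoop rest number

def get_directory (value : String) (number : String) : String :=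
  pvOuterLoop pvDirectories number

-- ===== PORT B =====
-- doc_to_shelf built by the module-level loop in Source B (first occurrence wins = no overwrite)
def pvDocToShelf : PySem.Dict String String :=
  (pvDirectories.foldl (fun d p => p.2.foldl
      (fun d doc => if d.contains doc then d else d.insert doc p.1) d)
    PySem.Dict.empty)

def get_directory_alt (value : String) (number : String) : String :=
  pvDocToShelf.getD number "Полка с таким документом не найдена!"

-- ===== PRECONDITION & SPEC =====
def Spec_get_directory (value : String) (number : String) (out : String) : Prop := out = get_directory_alt value number
instance (value : String) (number : String) (out : String) : Decidable (Spec_get_directory value number out) := by unfold Spec_get_directory; infer_instance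

-- ===== CLAIM (what is proved, stated in full; the proofs are below) =====
def Claim_equal_get_directory : Prop := ∀ (value : String) (number : String), Dom_get_directory value number → Spec_get_directory value number (get_directory value number)

-- ===== LEMMAS AND PROOFS =====
theorem pvDocToShelf_eq :
    pvDocToShelf = PySem.Dict.mk [("2207 876234", "1"), ("11-2", "1"), ("10006", "2")] := by
  decide

-- ===== VERDICT (by name: the statement is the Claim_ definition above) =====
theorem get_directory_spec : Claim_equal_get_directory := by
  intro v n _
  unfold Spec_get_directory get_directory get_directory_alt pvDirectories
  by_cases h1 : n = "2207 876234"
  · subst h1; decide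
  by_cases h2 : n = "11-2"
  · subst h2; decide
  by_cases h3 : n = "10006"
  · subst h3; decide
  rw [pvDocToShelf_eq]
  simp [pvOuterLoop, pvInnerLoop, PySem.Dict.getD_eq_get?_getD, PySem.Dict.get?_mk_cons, PySem.Dict.get?,
    Ne.symm h1, Ne.symm h2, Ne.symm h3]
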